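-- pv_equiv track=rewrite | github.com/dipsterr/dsa-python-2024 | amazon II.py | find_dependent_days_sum
-- ===== SOURCE A (Python) =====
-- def find_dependent_days_sum(n):
--     total_sum = 0
--
--     for x in range(n + 1):
--         lower_bound = n // (x + 1) + 1
--         if x!=0:
--             upper_bound = n // x
--         else:
--             upper_bound = 0
--         if lower_bound <= upper_bound:
--             total_sum += x
--
--     return total_sum
-- ===== SOURCE B (Python) =====
-- def find_dependent_days_sum(n):
--     # Sum of the distinct values of n // k (k = 1..n), enumerated by divisor blocks.
--     if n <= 0:
--         return 0
--     total = 0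
--     k = 1
--     while k <= n:
--         v = n // k
--         total += v
--         k = n // v + 1
--     return total
-- ===== Notes on version B (the rewrite author's own statement) =====
-- stated objective: faster
-- what changed: A scans every x in 0..n and tests whether n//(x+1) < n//x; B enumerates the distinct values of n//k directly by divisor blocks (k jumps to n//(n//k)+1), summing each value once.
import Mathlib
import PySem

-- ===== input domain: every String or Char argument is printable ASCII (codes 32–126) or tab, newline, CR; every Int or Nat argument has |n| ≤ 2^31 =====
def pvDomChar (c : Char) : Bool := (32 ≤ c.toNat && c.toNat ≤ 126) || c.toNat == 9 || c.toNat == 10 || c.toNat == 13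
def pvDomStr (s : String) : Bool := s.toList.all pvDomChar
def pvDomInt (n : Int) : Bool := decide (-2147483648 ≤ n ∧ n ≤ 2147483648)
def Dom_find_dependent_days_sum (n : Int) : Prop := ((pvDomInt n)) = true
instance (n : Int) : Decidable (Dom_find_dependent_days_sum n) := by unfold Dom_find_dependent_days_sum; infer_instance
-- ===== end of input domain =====

-- B replaces A's O(n) scan for values x with n//(x+1) < n//x by the O(sqrt n)
-- divisor-block enumeration of the distinct values of n//k; same return value everywhere.

-- ===== PORT A =====
def find_dependent_days_sum (n : Int) : Int :=
  (PySem.List.pyRange 0 (n + 1) 1).foldl (fun total_sum x =>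
    let lower_bound := PySem.Int.floordiv n (x + 1) + 1
    let upper_bound := if x ≠ 0 then PySem.Int.floordiv n x else 0
    if lower_bound ≤ upper_bound then total_sum + x else total_sum) 0

-- ===== PORT B =====
-- termination fact for the while loop: k strictly increases (k' = n//(n//k) + 1 > k)
theorem pvAltProgress (n k : Int) (h1 : 1 ≤ k) (h2 : k ≤ n) :
    k ≤ PySem.Int.floordiv n (PySem.Int.floordiv n k) := by
  have hv1 : 1 ≤ PySem.Int.floordiv n k :=
    (PySem.Int.le_floordiv_iff_mul_le (by omega)).2 (by omega)
  have hvk : PySem.Int.floordiv n k * k ≤ n :=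
    (PySem.Int.le_floordiv_iff_mul_le (by omega)).1 le_rfl
  exact (PySem.Int.le_floordiv_iff_mul_le (by omega)).2 (by nlinarith)

def pvAltLoop (n k total : Int) : Int :=
  if h : 1 ≤ k ∧ k ≤ n then
    let v := PySem.Int.floordiv n k
    pvAltLoop n (PySem.Int.floordiv n v + 1) (total + v)
  else total
termination_by (n + 1 - k).toNat
decreasing_by
  have := pvAltProgress n k h.1 h.2
  omega

def find_dependent_days_sum_alt (n : Int) : Int :=
  if n ≤ 0 then 0 else pvAltLoop n 1 0

-- ===== PRECONDITION & SPEC =====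
def Spec_find_dependent_days_sum (n : Int) (out : Int) : Prop := out = find_dependent_days_sum_alt n
instance (n : Int) (out : Int) : Decidable (Spec_find_dependent_days_sum n out) := by unfold Spec_find_dependent_days_sum; infer_instance

-- ===== CLAIM (what is proved, stated in full; the proofs are below) =====
def Claim_equal_find_dependent_days_sum : Prop := ∀ (n : Int), Dom_find_dependent_days_sum n → Spec_find_dependent_days_sum n (find_dependent_days_sum n)

-- ===== LEMMAS AND PROOFS =====

-- partial sums of A's summand: pvS n m = Σ_{x=1}^{m} x · [n//(x+1)+1 ≤ n//x]
def pvS (n : Int) : Nat → Int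
  | 0 => 0
  | m + 1 => pvS n m +
      (if PySem.Int.floordiv n ((m : Int) + 1 + 1) + 1 ≤ PySem.Int.floordiv n ((m : Int) + 1)
       then (m : Int) + 1 else 0)

theorem pv_fd_nonneg (n b : Int) (hn : 0 ≤ n) (hb : 0 < b) : 0 ≤ PySem.Int.floordiv n b :=
  (PySem.Int.le_floordiv_iff_mul_le hb).2 (by omega)

theorem pv_fd_anti (n a b : Int) (hn : 0 ≤ n) (ha : 0 < a) (hab : a ≤ b) :
    PySem.Int.floordiv n b ≤ PySem.Int.floordiv n a := by
  have h0 : 0 ≤ PySem.Int.floordiv n b := pv_fd_nonneg n b hn (by omega)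
  have hb : PySem.Int.floordiv n b * b ≤ n :=
    (PySem.Int.le_floordiv_iff_mul_le (by omega)).1 le_rfl
  exact (PySem.Int.le_floordiv_iff_mul_le ha).2 (by nlinarith)

theorem pv_fd_one (n : Int) (_hn : 0 ≤ n) : PySem.Int.floordiv n 1 = n := by
  rw [PySem.Int.floordiv_eq_iff_of_pos (by omega)]; omega

theorem pv_fd_zero_of_gt (n k : Int) (hn : 0 ≤ n) (hk : n < k) :
    PySem.Int.floordiv n k = 0 := by
  rw [PySem.Int.floordiv_eq_iff_of_pos (by omega)]; omega

-- if x is achieved as a value then n // (n // x) = x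
theorem pv_achieved (n x : Int) (hn : 0 ≤ n) (hx : 1 ≤ x)
    (hC : PySem.Int.floordiv n (x + 1) + 1 ≤ PySem.Int.floordiv n x) :
    PySem.Int.floordiv n (PySem.Int.floordiv n x) = x := by
  have h0 : 0 ≤ PySem.Int.floordiv n (x + 1) := pv_fd_nonneg n (x + 1) hn (by omega)
  have hq1 : 1 ≤ PySem.Int.floordiv n x := by omega
  have hqx : PySem.Int.floordiv n x * x ≤ n :=
    (PySem.Int.le_floordiv_iff_mul_le (by omega)).1 le_rfl
  have hlt : n < PySem.Int.floordiv n x * (x + 1) :=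
    (PySem.Int.floordiv_lt_iff_lt_mul (by omega)).1 (by omega)
  rw [PySem.Int.floordiv_eq_iff_of_pos (by omega)]
  constructor
  · nlinarith
  · nlinarith

-- every value v = n // k satisfies A's condition
theorem pv_C_of_value (n k : Int) (h1 : 1 ≤ k) (h2 : k ≤ n) :
    PySem.Int.floordiv n (PySem.Int.floordiv n k + 1) + 1 ≤
      PySem.Int.floordiv n (PySem.Int.floordiv n k) := by
  have hk := pvAltProgress n k h1 h2
  have hvk : PySem.Int.floordiv n k < PySem.Int.floordiv n k + 1 := by omega
  have hn : n < k * (PySem.Int.floordiv n k + 1) := by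
    have := (PySem.Int.floordiv_lt_iff_lt_mul (b := k) (a := n) (by omega)).1 hvk
    nlinarith [this]
  have : PySem.Int.floordiv n (PySem.Int.floordiv n k + 1) < k := by
    have hv0 : 0 ≤ PySem.Int.floordiv n k := pv_fd_nonneg n k (by omega) (by omega)
    exact (PySem.Int.floordiv_lt_iff_lt_mul (by omega)).2 (by nlinarith)
  omega

-- no value of A's condition lies strictly between n//(n//(n//k)+1) and n//k
theorem pv_gap (n k x : Int) (h1 : 1 ≤ k) (h2 : k ≤ n)
    (hx1 : PySem.Int.floordiv n (PySem.Int.floordiv n (PySem.Int.floordiv n k) + 1) < x)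
    (hx2 : x < PySem.Int.floordiv n k) :
    ¬ (PySem.Int.floordiv n (x + 1) + 1 ≤ PySem.Int.floordiv n x) := by
  intro hC
  have hn0 : (0 : Int) ≤ n := by omega
  have hv0 : 0 ≤ PySem.Int.floordiv n (PySem.Int.floordiv n (PySem.Int.floordiv n k) + 1) := by
    have hw := pvAltProgress n k h1 h2
    exact pv_fd_nonneg n _ hn0 (by omega)
  have hx0 : 1 ≤ x := by omega
  have hach := pv_achieved n x hn0 hx0 hC
  have hq1 : 1 ≤ PySem.Int.floordiv n x := by
    have := pv_fd_nonneg n (x + 1) hn0 (by omega); omega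
  -- q := n // x ≥ n // (n//k) since x ≤ n//k
  have hmono : PySem.Int.floordiv n (PySem.Int.floordiv n k) ≤ PySem.Int.floordiv n x :=
    pv_fd_anti n x (PySem.Int.floordiv n k) hn0 (by omega) (by omega)
  -- q ≠ n // (n//k): otherwise x = n//q ≥ n//k, contradiction
  have hne : PySem.Int.floordiv n x ≠ PySem.Int.floordiv n (PySem.Int.floordiv n k) := by
    intro he
    have hv1 : 1 ≤ PySem.Int.floordiv n k :=
      (PySem.Int.le_floordiv_iff_mul_le (by omega)).2 (by omega)
    have hvk : PySem.Int.floordiv n k * k ≤ n :=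
      (PySem.Int.le_floordiv_iff_mul_le (by omega)).1 le_rfl
    have hvn : PySem.Int.floordiv n k ≤ n := by nlinarith
    have hge : PySem.Int.floordiv n k ≤ x := by
      rw [← hach, he]
      exact pvAltProgress n (PySem.Int.floordiv n k) hv1 hvn
    omega
  have hgt : PySem.Int.floordiv n (PySem.Int.floordiv n k) + 1 ≤ PySem.Int.floordiv n x := by omega
  have hh0 : 0 ≤ PySem.Int.floordiv n (PySem.Int.floordiv n k) := pv_fd_nonneg n _ hn0 (by omega)
  -- then x = n//q ≤ n//(n//(n//k)+1), contradiction
  have : x ≤ PySem.Int.floordiv n (PySem.Int.floordiv n (PySem.Int.floordiv n k) + 1) := by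
    rw [← hach]
    exact pv_fd_anti n _ _ hn0 (by omega) hgt
  omega

theorem pvS_const (n : Int) (a b : Nat) (hba : b ≤ a)
    (h : ∀ x : Nat, b < x → x ≤ a →
      ¬ (PySem.Int.floordiv n ((x : Int) + 1) + 1 ≤ PySem.Int.floordiv n (x : Int))) :
    pvS n a = pvS n b := by
  induction a with
  | zero =>
    have hb : b = 0 := by omega
    rw [hb]
  | succ a ih =>
    rcases Nat.lt_or_ge b (a + 1) with hlt | hge
    · have hcond := h (a + 1) hlt le_rfl
      have : pvS n (a + 1) = pvS n a := by
        simp only [pvS]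
        rw [if_neg (by push_cast at hcond ⊢; exact hcond)]
        omega
      rw [this]
      exact ih (by omega) (fun x hx1 hx2 => h x hx1 (by omega))
    · have : b = a + 1 := by omega
      rw [this]

theorem pv_chunk (n k : Int) (h1 : 1 ≤ k) (h2 : k ≤ n) :
    pvS n (PySem.Int.floordiv n k).toNat =
      PySem.Int.floordiv n k +
        pvS n (PySem.Int.floordiv n (PySem.Int.floordiv n (PySem.Int.floordiv n k) + 1)).toNat := by
  have hn0 : (0 : Int) ≤ n := by omega
  have hv1 : 1 ≤ PySem.Int.floordiv n k :=
    (PySem.Int.le_floordiv_iff_mul_le (by omega)).2 (by omega)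
  have hw := pvAltProgress n k h1 h2
  have hv'0 : 0 ≤ PySem.Int.floordiv n (PySem.Int.floordiv n (PySem.Int.floordiv n k) + 1) :=
    pv_fd_nonneg n _ hn0 (by omega)
  have hv'lt : PySem.Int.floordiv n (PySem.Int.floordiv n (PySem.Int.floordiv n k) + 1) <
      PySem.Int.floordiv n k := by
    have hvv : PySem.Int.floordiv n (PySem.Int.floordiv n k) <
        PySem.Int.floordiv n (PySem.Int.floordiv n k) + 1 := by omega
    have hlt : n < (PySem.Int.floordiv n (PySem.Int.floordiv n k) + 1) * PySem.Int.floordiv n k :=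
      (PySem.Int.floordiv_lt_iff_lt_mul (by omega)).1 hvv
    exact (PySem.Int.floordiv_lt_iff_lt_mul (by omega)).2 (by nlinarith)
  -- write v.toNat = m + 1 and peel the top term, which is v by pv_C_of_value
  obtain ⟨m, hm⟩ : ∃ m : Nat, (PySem.Int.floordiv n k).toNat = m + 1 :=
    ⟨(PySem.Int.floordiv n k).toNat - 1, by omega⟩
  have hmv : ((m : Int) + 1) = PySem.Int.floordiv n k := by omega
  rw [hm]
  simp only [pvS]
  rw [hmv, if_pos (pv_C_of_value n k h1 h2)]
  have hconst : pvS n m =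
      pvS n (PySem.Int.floordiv n (PySem.Int.floordiv n (PySem.Int.floordiv n k) + 1)).toNat := by
    apply pvS_const
    · omega
    · intro x hx1 hx2
      apply pv_gap n k (x : Int) h1 h2
      · omega
      · omega
  rw [hconst]; ring

theorem pvAltLoop_eq (N : Nat) : ∀ (n k total : Int), (n + 1 - k).toNat ≤ N →
    1 ≤ k → k ≤ n →
    pvAltLoop n k total = total + pvS n (PySem.Int.floordiv n k).toNat := by
  induction N with
  | zero => intro n k total hN h1 h2; omega
  | succ N ih =>
    intro n k total hN h1 h2
    have hn0 : (0 : Int) ≤ n := by omega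
    have hw := pvAltProgress n k h1 h2
    rw [pvAltLoop, dif_pos ⟨h1, h2⟩]
    show pvAltLoop n (PySem.Int.floordiv n (PySem.Int.floordiv n k) + 1)
        (total + PySem.Int.floordiv n k) = total + pvS n (PySem.Int.floordiv n k).toNat
    rcases le_or_gt (PySem.Int.floordiv n (PySem.Int.floordiv n k) + 1) n with hle | hgt
    · rw [ih n _ _ (by omega) (by omega) hle, pv_chunk n k h1 h2]
      ring
    · rw [pvAltLoop, dif_neg (by omega)]
      have hz : PySem.Int.floordiv n (PySem.Int.floordiv n (PySem.Int.floordiv n k) + 1) = 0 :=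
        pv_fd_zero_of_gt n _ hn0 (by omega)
      have hch := pv_chunk n k h1 h2
      rw [hz] at hch
      simp only [Int.toNat_zero, pvS] at hch
      omega

-- A's foldl over range(0, m+2) equals pvS n (m+1)
theorem pvA_foldl (n : Int) (hn : 0 ≤ n) : ∀ m : Nat,
    (PySem.List.pyRange 0 ((m : Int) + 1) 1).foldl (fun total_sum x =>
      let lower_bound := PySem.Int.floordiv n (x + 1) + 1
      let upper_bound := if x ≠ 0 then PySem.Int.floordiv n x else 0
      if lower_bound ≤ upper_bound then total_sum + x else total_sum) 0 = pvS n m := by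
  intro m
  induction m with
  | zero =>
    rw [show ((0 : Nat) : Int) + 1 = 0 + 1 by norm_num, PySem.List.pyRange_one_singleton]
    simp only [List.foldl]
    rw [show (if (0 : Int) ≠ 0 then PySem.Int.floordiv n 0 else 0) = 0 from if_neg (by omega)]
    rw [show ((0 : Int) + 1) = 1 by norm_num, pv_fd_one n hn]
    rw [if_neg (by omega)]
    rfl
  | succ m ih =>
    have hsplit : PySem.List.pyRange 0 (((m + 1 : Nat) : Int) + 1) 1 =
        PySem.List.pyRange 0 ((m : Int) + 1) 1 ++ [(m : Int) + 1] := by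
      rw [show (((m + 1 : Nat) : Int) + 1) = ((m : Int) + 1) + 1 by push_cast; ring]
      exact PySem.List.pyRange_one_succ_right (by omega)
    rw [hsplit, List.foldl_append, ih]
    simp only [List.foldl]
    rw [show (if ((m : Int) + 1) ≠ 0 then PySem.Int.floordiv n ((m : Int) + 1) else 0) =
        PySem.Int.floordiv n ((m : Int) + 1) from if_pos (by omega)]
    show (if PySem.Int.floordiv n ((m : Int) + 1 + 1) + 1 ≤ PySem.Int.floordiv n ((m : Int) + 1)
        then pvS n m + ((m : Int) + 1) else pvS n m) = pvS n (m + 1)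
    simp only [pvS]
    split_ifs with h
    · rfl
    · omega

theorem pvA_eq (n : Int) (hn : 0 ≤ n) : find_dependent_days_sum n = pvS n n.toNat := by
  unfold find_dependent_days_sum
  have h := pvA_foldl n hn n.toNat
  rw [show ((n.toNat : Int) + 1) = n + 1 by omega] at h
  exact h

-- ===== VERDICT (by name: the statement is the Claim_ definition above) =====
theorem find_dependent_days_sum_spec : Claim_equal_find_dependent_days_sum := by
  intro n _
  unfold Spec_find_dependent_days_sum find_dependent_days_sum_alt
  rcases le_or_gt n 0 with hle | hpos
  · rw [if_pos hle]
    rcases lt_or_eq_of_le hle with hlt | heq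
    · unfold find_dependent_days_sum
      rw [PySem.List.pyRange_one_eq_nil (by omega)]
      rfl
    · rw [heq] at *
      rw [pvA_eq 0 le_rfl]
      rfl
  · rw [if_neg (by omega)]
    rw [pvAltLoop_eq (n + 1 - 1).toNat n 1 0 (by omega) (by omega) (by omega)]
    rw [pv_fd_one n (by omega)]
    rw [pvA_eq n (by omega)]
    omega
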